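-- pv_equiv track=rewrite | github.com/WiktoriaSadlo/pp1 | zadanka/temat_04/zad_41.py | f
-- ===== SOURCE A (Python) =====
-- def f(n):
--     x=[]
--     i=0
--     while len(x)<n:
--         if i==2 or i==3 or i==5 or i==7:
--             x.append(i)
--         elif i%2!=0 and i%3!=0 and i%5!=0 and i%7!=0 and i>2:
--             x.append(i)
--         i+=1
--     return x[n-1]
-- ===== SOURCE B (Python) =====
-- # O(1) closed form: the sequence is 2,3,5,7 followed by the integers > 7 coprime
-- # to 210, which repeat with period 210 (48 residues per period).
-- _R = [r for r in range(11, 221) if r % 2 and r % 3 and r % 5 and r % 7]  # 48 values, 11..211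
--
-- def f(n):
--     if n <= 4:
--         return [2, 3, 5, 7][n - 1]
--     q, r = divmod(n - 5, 48)
--     return 210 * q + _R[r]
-- ===== Notes on version B (the rewrite author's own statement) =====
-- stated objective: faster
-- what changed: Replaced the while-loop that tests every integer and accumulates a list with an O(1) closed form: a 4-entry table for 2,3,5,7 plus period-210 arithmetic over the 48 residues coprime to 210.
import Mathlib
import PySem

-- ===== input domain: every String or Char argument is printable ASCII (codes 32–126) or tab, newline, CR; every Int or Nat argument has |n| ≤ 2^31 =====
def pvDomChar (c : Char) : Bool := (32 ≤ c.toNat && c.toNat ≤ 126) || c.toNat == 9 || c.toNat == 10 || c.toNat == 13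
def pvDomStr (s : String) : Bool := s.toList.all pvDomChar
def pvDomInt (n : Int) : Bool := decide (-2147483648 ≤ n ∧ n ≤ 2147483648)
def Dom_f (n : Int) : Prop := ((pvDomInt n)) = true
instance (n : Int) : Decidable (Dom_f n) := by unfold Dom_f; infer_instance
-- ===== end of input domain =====

-- B replaces A's element-by-element while loop with an O(1) closed form
-- (table for 2,3,5,7 plus period-210 arithmetic over the 48 residues coprime to 210).

-- ===== PORT A =====

-- the membership test A's loop body performs (both branches merged in order)
def P (i : Int) : Bool :=
  (i == 2 || i == 3 || i == 5 || i == 7) ||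
  ((PySem.Int.mod i 2 != 0) && (PySem.Int.mod i 3 != 0) && (PySem.Int.mod i 5 != 0) &&
   (PySem.Int.mod i 7 != 0) && decide (2 < i))

-- proof-side residue test used only to justify TERMINATION of A's while loop
def coprimeB (r : Int) : Bool :=
  (r % 2 != 0) && (r % 3 != 0) && (r % 5 != 0) && (r % 7 != 0)

theorem P_periodic (j : Int) (hj : 11 ≤ j) : P j = coprimeB (j % 210) := by
  have e2 : PySem.Int.mod j 2 = (j % 210) % 2 := by
    rw [PySem.Int.mod_eq_emod_of_pos (by norm_num), Int.emod_emod_of_dvd j (by norm_num)]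
  have e3 : PySem.Int.mod j 3 = (j % 210) % 3 := by
    rw [PySem.Int.mod_eq_emod_of_pos (by norm_num), Int.emod_emod_of_dvd j (by norm_num)]
  have e5 : PySem.Int.mod j 5 = (j % 210) % 5 := by
    rw [PySem.Int.mod_eq_emod_of_pos (by norm_num), Int.emod_emod_of_dvd j (by norm_num)]
  have e7 : PySem.Int.mod j 7 = (j % 210) % 7 := by
    rw [PySem.Int.mod_eq_emod_of_pos (by norm_num), Int.emod_emod_of_dvd j (by norm_num)]
  simp only [P, coprimeB, e2, e3, e5, e7]
  simp [show j ≠ 2 by omega, show j ≠ 3 by omega, show j ≠ 5 by omega,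
        show j ≠ 7 by omega, show (2:Int) < j by omega, Bool.and_assoc]

-- every residue class reaches a coprime residue within 10 steps (finite check)
def resOK : Bool :=
  (List.range 210).all (fun t => (List.range 10).any (fun d => coprimeB (((t : Int) + (d : Int)) % 210)))

theorem resOK_true : resOK = true := by decide

-- from any j ≥ 3 the next element of the sequence is at most 9 steps away
theorem P_soon (j : Int) (hj : 3 ≤ j) : ∃ d : Nat, d < 10 ∧ P (j + (d : Int)) = true := by
  by_cases hj11 : j < 11
  · interval_cases j <;>
      first
        | exact ⟨0, by omega, by decide⟩
        | exact ⟨1, by omega, by decide⟩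
        | exact ⟨2, by omega, by decide⟩
        | exact ⟨3, by omega, by decide⟩
  · rw [not_lt] at hj11
    have ht : (j % 210).toNat < 210 := by
      have h1 : 0 ≤ j % 210 := Int.emod_nonneg j (by norm_num)
      have h2 : j % 210 < 210 := Int.emod_lt_of_pos j (by norm_num)
      omega
    have := resOK_true
    simp only [resOK, List.all_eq_true, List.any_eq_true, List.mem_range] at this
    obtain ⟨d, hd, hcop⟩ := this (j % 210).toNat ht
    refine ⟨d, hd, ?_⟩
    rw [P_periodic (j + d) (by omega)]
    have heq : (j + (d : Int)) % 210 = (((j % 210).toNat : Int) + (d : Int)) % 210 := by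
      conv_lhs => rw [Int.add_emod]
      conv_rhs => rw [Int.add_emod]
      congr 2
      omega
    rw [heq]
    exact hcop

-- capped distance-to-next-element counter (termination measure helper)
def gapAux : Nat → Int → Nat
  | 0, _ => 0
  | fuel+1, i => if P i then 0 else gapAux fuel (i+1) + 1

theorem gapAux_stable (fuel : Nat) (j : Int)
    (h : ∃ d : Nat, d < fuel ∧ P (j + (d : Int)) = true) :
    gapAux (fuel+1) j = gapAux fuel j := by
  induction fuel generalizing j with
  | zero => obtain ⟨d, hd, _⟩ := h; omega
  | succ f ih =>
    obtain ⟨d, hd, hP⟩ := h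
    by_cases hj : P j = true
    · rw [show gapAux (f + 1 + 1) j = if P j then 0 else gapAux (f + 1) (j + 1) + 1 from rfl,
          show gapAux (f + 1) j = if P j then 0 else gapAux f (j + 1) + 1 from rfl,
          if_pos hj, if_pos hj]
    · have hd0 : d ≠ 0 := by
        intro h0; subst h0; simp at hP; simp [hP] at hj
      obtain ⟨d', rfl⟩ := Nat.exists_eq_succ_of_ne_zero hd0
      have hsh : P (j + 1 + (d' : Int)) = true := by
        have : j + ((d' + 1 : Nat) : Int) = j + 1 + (d' : Int) := by push_cast; ring
        rwa [this] at hP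
      rw [show gapAux (f + 1 + 1) j = if P j then 0 else gapAux (f + 1) (j + 1) + 1 from rfl,
          show gapAux (f + 1) j = if P j then 0 else gapAux f (j + 1) + 1 from rfl,
          if_neg hj, if_neg hj, ih (j + 1) ⟨d', by omega, hsh⟩]

def gapN (i : Int) : Nat := if i < 2 then (12 - i).toNat else gapAux 11 i

theorem gap_dec (i : Int) (h : P i = false) : gapN (i + 1) < gapN i := by
  by_cases h1 : i < 1
  · unfold gapN
    rw [if_pos (by omega), if_pos (by omega)]
    omega
  · by_cases h2 : i < 2
    · have : i = 1 := by omega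
      subst this
      show gapN 2 < gapN 1
      decide
    · rw [not_lt] at h1 h2
      unfold gapN
      rw [if_neg (by omega), if_neg (by omega)]
      have hstep : gapAux 11 i = gapAux 10 (i+1) + 1 := by
        rw [show gapAux 11 i = if P i then 0 else gapAux 10 (i + 1) + 1 from rfl, if_neg (by simp [h])]
      rw [hstep]
      have h11 : gapAux 11 (i + 1) = gapAux 10 (i + 1) := by
        have := gapAux_stable 10 (i + 1) (P_soon (i + 1) (by omega))
        simpa using this
      omega

-- the while loop of A: grow x until len(x) = n, testing each i in turn
def fLoop (n : Int) (x : List Int) (i : Int) : List Int :=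
  if h : (x.length : Int) < n then
    if hp : P i then fLoop n (x ++ [i]) (i + 1)
    else fLoop n x (i + 1)
  else x
termination_by (n.toNat - x.length, gapN i)
decreasing_by
  · apply Prod.Lex.left
    simp only [List.length_append, List.length_cons, List.length_nil]
    omega
  · apply Prod.Lex.right
    exact gap_dec i (by simpa using hp)

-- x[n-1]: Python raises IndexError for n ≤ 0 (excluded by Pre_f); .getD 0 is never taken there
def f (n : Int) : Int := ((PySem.List.pyGet? (fLoop n [] 0) (n - 1)).getD 0)

-- ===== PORT B =====

-- the 48 integers in [11, 220] coprime to 210 (Source B's module-level _R)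
def Rlist : List Int :=
  [11, 13, 17, 19, 23, 29, 31, 37, 41, 43, 47, 53, 59, 61, 67, 71, 73, 79, 83, 89,
   97, 101, 103, 107, 109, 113, 121, 127, 131, 137, 139, 143, 149, 151, 157, 163,
   167, 169, 173, 179, 181, 187, 191, 193, 197, 199, 209, 211]

def f_alt (n : Int) : Int :=
  if n ≤ 4 then (PySem.List.pyGet? [2, 3, 5, 7] (n - 1)).getD 0
  else 210 * PySem.Int.floordiv (n - 5) 48 +
       (PySem.List.pyGet? Rlist (PySem.Int.mod (n - 5) 48)).getD 0

-- ===== PRECONDITION & SPEC =====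
-- Pre_f excludes exactly n ≤ 0, where Python A raises IndexError (x[n-1] on the empty list)
def Pre_f (n : Int) : Prop := 1 ≤ n
instance (n : Int) : Decidable (Pre_f n) := by unfold Pre_f; infer_instance

def pvWitness_f : Int := 5

def Spec_f (n : Int) (out : Int) : Prop := out = f_alt n
instance (n : Int) (out : Int) : Decidable (Spec_f n out) := by unfold Spec_f; infer_instance

-- ===== CLAIM (what is proved, stated in full; the proofs are below) =====
def Claim_equal_f : Prop := ∀ (n : Int), Dom_f n → Pre_f n → Spec_f n (f n)

-- ===== LEMMAS AND PROOFS =====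

-- the closed-form enumeration (proof-side mirror of B's formula, 0-indexed)
def aSeq (k : Nat) : Int :=
  if k < 4 then (([2, 3, 5, 7] : List Int)[k]?).getD 0
  else 210 * (((k - 4) / 48 : Nat) : Int) + (Rlist[(k - 4) % 48]?).getD 0

theorem Rlist_entry : ∀ r < 48, 11 ≤ (Rlist[r]?).getD 0 ∧ (Rlist[r]?).getD 0 ≤ 211 ∧
    coprimeB ((Rlist[r]?).getD 0 % 210) = true := by decide

theorem Rlist_mono : ∀ r < 47, (Rlist[r]?).getD 0 < (Rlist[r+1]?).getD 0 := by decide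

set_option maxRecDepth 8192 in
theorem Rlist_complete : ∀ u < 210, 11 ≤ u → coprimeB ((u : Nat) : Int) = true →
    ∃ r < 48, (Rlist[r]?).getD 0 = ((u : Nat) : Int) := by decide

theorem aSeq_mem (k : Nat) : P (aSeq k) = true := by
  by_cases hk : k < 4
  · interval_cases k <;> decide
  · rw [not_lt] at hk
    unfold aSeq
    rw [if_neg (by omega)]
    have hr48 : (k - 4) % 48 < 48 := Nat.mod_lt _ (by norm_num)
    obtain ⟨hlo, hhi, hcop⟩ := Rlist_entry ((k - 4) % 48) hr48
    have hq0 : (0 : Int) ≤ (((k - 4) / 48 : Nat) : Int) := Int.natCast_nonneg _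
    have h11 : (11 : Int) ≤ 210 * (((k - 4) / 48 : Nat) : Int) + (Rlist[(k - 4) % 48]?).getD 0 := by
      omega
    rw [P_periodic _ h11]
    have hmod : (210 * (((k - 4) / 48 : Nat) : Int) + (Rlist[(k - 4) % 48]?).getD 0) % 210
        = (Rlist[(k - 4) % 48]?).getD 0 % 210 := by omega
    rw [hmod]
    exact hcop

theorem aSeq_mono (k : Nat) : aSeq k < aSeq (k + 1) := by
  by_cases hk : k < 4
  · interval_cases k <;> decide
  · rw [not_lt] at hk
    unfold aSeq
    rw [if_neg (by omega), if_neg (by omega)]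
    have e1 : k + 1 - 4 = (k - 4) + 1 := by omega
    rw [e1]
    by_cases hr : (k - 4) % 48 < 47
    · have hd1 : ((k - 4) + 1) / 48 = (k - 4) / 48 := by omega
      have hd2 : ((k - 4) + 1) % 48 = (k - 4) % 48 + 1 := by omega
      rw [hd1, hd2]
      have := Rlist_mono ((k - 4) % 48) hr
      omega
    · have hr47 : (k - 4) % 48 = 47 := by omega
      have hd1 : ((k - 4) + 1) / 48 = (k - 4) / 48 + 1 := by omega
      have hd2 : ((k - 4) + 1) % 48 = 0 := by omega
      rw [hd1, hd2, hr47,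
          show ((Rlist[(47 : Nat)]?).getD 0 : Int) = 211 by decide,
          show ((Rlist[(0 : Nat)]?).getD 0 : Int) = 11 by decide]
      push_cast
      omega

theorem aSeq_surj (t : Int) (ht : 0 ≤ t) (hP : P t = true) : ∃ k : Nat, aSeq k = t := by
  by_cases h11 : t < 11
  · interval_cases t <;>
      first
        | exact ⟨0, by decide⟩
        | exact ⟨1, by decide⟩
        | exact ⟨2, by decide⟩
        | exact ⟨3, by decide⟩
        | exact absurd hP (by decide)
  · rw [not_lt] at h11
    have hsplit := Int.mul_ediv_add_emod t 210
    have hs0 : 0 ≤ t % 210 := Int.emod_nonneg t (by norm_num)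
    have hs210 : t % 210 < 210 := Int.emod_lt_of_pos t (by norm_num)
    have hq0 : 0 ≤ t / 210 := by omega
    have hcop : coprimeB (t % 210) = true := by rw [← P_periodic t h11]; exact hP
    by_cases hs11 : 11 ≤ t % 210
    · have hcop' : coprimeB (((t % 210).toNat : Nat) : Int) = true := by
        rwa [show (((t % 210).toNat : Nat) : Int) = t % 210 by omega]
      obtain ⟨r, hr48, hrv⟩ := Rlist_complete (t % 210).toNat (by omega) (by omega) hcop'
      refine ⟨4 + 48 * (t / 210).toNat + r, ?_⟩
      unfold aSeq
      rw [if_neg (by omega)]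
      have e : 4 + 48 * (t / 210).toNat + r - 4 = 48 * (t / 210).toNat + r := by omega
      rw [e]
      have hd1 : (48 * (t / 210).toNat + r) / 48 = (t / 210).toNat := by omega
      have hd2 : (48 * (t / 210).toNat + r) % 48 = r := by omega
      rw [hd1, hd2, hrv]
      omega
    · have hs1 : t % 210 = 1 := by
        rw [not_le] at hs11
        interval_cases h : t % 210 <;> revert hcop <;> decide
      have hq1 : 1 ≤ t / 210 := by omega
      refine ⟨4 + 48 * ((t / 210).toNat - 1) + 47, ?_⟩
      unfold aSeq
      rw [if_neg (by omega)]
      have e : 4 + 48 * ((t / 210).toNat - 1) + 47 - 4 = 48 * ((t / 210).toNat - 1) + 47 := by omega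
      rw [e]
      have hd1 : (48 * ((t / 210).toNat - 1) + 47) / 48 = (t / 210).toNat - 1 := by omega
      have hd2 : (48 * ((t / 210).toNat - 1) + 47) % 48 = 47 := by omega
      rw [hd1, hd2, show ((Rlist[(47 : Nat)]?).getD 0 : Int) = 211 by decide]
      omega

theorem aSeq_strictMono : StrictMono aSeq :=
  strictMono_nat_of_lt_succ aSeq_mono

theorem aSeq_no_between (k : Nat) (t : Int) (h1 : aSeq k < t) (h2 : t < aSeq (k + 1)) :
    P t = false := by
  by_contra h
  have hP : P t = true := by simpa using h
  have ht : 0 ≤ t := by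
    have h0 : (2 : Int) ≤ aSeq k := by
      have := aSeq_strictMono.monotone (Nat.zero_le k)
      simpa [aSeq] using this
    omega
  obtain ⟨k', hk'⟩ := aSeq_surj t ht hP
  have l1 : k < k' := aSeq_strictMono.lt_iff_lt.mp (by rw [hk']; exact h1)
  have l2 : k' < k + 1 := aSeq_strictMono.lt_iff_lt.mp (by rw [hk']; exact h2)
  omega

-- the first m sequence elements ≥ i (proof-side)
def seqFrom (m : Nat) (i : Int) : List Int :=
  match m with
  | 0 => []
  | m' + 1 => if hp : P i then i :: seqFrom m' (i + 1) else seqFrom (m' + 1) (i + 1)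
termination_by (m, gapN i)
decreasing_by
  · apply Prod.Lex.left; omega
  · apply Prod.Lex.right
    exact gap_dec i (by simpa using hp)

theorem seqFrom_zero (i : Int) : seqFrom 0 i = [] := by
  rw [seqFrom]

theorem seqFrom_succ_pos (m : Nat) (i : Int) (h : P i = true) :
    seqFrom (m + 1) i = i :: seqFrom m (i + 1) := by
  rw [seqFrom]; simp [h]

theorem seqFrom_succ_neg (m : Nat) (i : Int) (h : P i = false) :
    seqFrom (m + 1) i = seqFrom (m + 1) (i + 1) := by
  rw [seqFrom]; simp [h]

theorem seqFrom_skip (c : Nat) : ∀ (m : Nat) (i j : Int), (j - i).toNat = c → i ≤ j →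
    (∀ t, i ≤ t → t < j → P t = false) → seqFrom m i = seqFrom m j := by
  induction c with
  | zero =>
    intro m i j hc hij _
    have : i = j := by omega
    rw [this]
  | succ c ih =>
    intro m i j hc hij hno
    have hPi : P i = false := hno i le_rfl (by omega)
    have step : seqFrom m i = seqFrom m (i + 1) := by
      match m with
      | 0 => rw [seqFrom_zero, seqFrom_zero]
      | m' + 1 => exact seqFrom_succ_neg m' i hPi
    rw [step]
    exact ih m (i + 1) j (by omega) (by omega) (fun t h1 h2 => hno t (by omega) h2)

theorem seqFrom_enum (m : Nat) : ∀ k : Nat, seqFrom m (aSeq k) = (List.range m).map (fun j => aSeq (k + j)) := by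
  induction m with
  | zero => intro k; rw [seqFrom_zero]; simp
  | succ m ih =>
    intro k
    rw [seqFrom_succ_pos m (aSeq k) (aSeq_mem k)]
    have hskip : seqFrom m (aSeq k + 1) = seqFrom m (aSeq (k + 1)) := by
      apply seqFrom_skip ((aSeq (k+1) - (aSeq k + 1)).toNat) m _ _ rfl
      · have := aSeq_mono k; omega
      · intro t h1 h2
        exact aSeq_no_between k t (by omega) h2
    rw [hskip, ih (k + 1), List.range_succ_eq_map, List.map_cons, List.map_map]
    congr 1
    apply List.map_congr_left
    intro a _
    simp only [Function.comp_apply]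
    congr 1
    omega

theorem seqFrom_start (m : Nat) : seqFrom m 0 = (List.range m).map aSeq := by
  have h02 : seqFrom m 0 = seqFrom m 2 := by
    apply seqFrom_skip 2 m 0 2 (by decide) (by decide)
    intro t h1 h2
    interval_cases t <;> decide
  rw [h02, show (2 : Int) = aSeq 0 by decide, seqFrom_enum m 0]
  simp

theorem fLoop_eq (n : Int) (x : List Int) (i : Int) :
    fLoop n x i = x ++ seqFrom (n - x.length).toNat i := by
  induction x, i using fLoop.induct n with
  | case1 x i h hp ih =>
    rw [fLoop, dif_pos h, dif_pos hp, ih]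
    have hm : (n - x.length).toNat = (n - (x ++ [i]).length).toNat + 1 := by
      simp only [List.length_append, List.length_cons, List.length_nil]; omega
    rw [hm, seqFrom_succ_pos _ _ hp]
    simp
  | case2 x i h hp ih =>
    rw [fLoop, dif_pos h, dif_neg hp, ih]
    have hp' : P i = false := by simpa using hp
    obtain ⟨m', hm⟩ : ∃ m', (n - x.length).toNat = m' + 1 :=
      ⟨(n - x.length).toNat - 1, by omega⟩
    rw [hm, seqFrom_succ_neg _ _ hp']
  | case3 x i h =>
    rw [fLoop, dif_neg h]
    have h0 : (n - x.length).toNat = 0 := by omega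
    rw [h0, seqFrom_zero]
    simp

theorem f_char (n : Int) (hn : 1 ≤ n) : f n = aSeq (n.toNat - 1) := by
  unfold f
  rw [fLoop_eq n [] 0, List.nil_append,
      show (n - (([] : List Int).length : Int)).toNat = n.toNat by simp,
      seqFrom_start,
      show n - 1 = ((n.toNat - 1 : Nat) : Int) by omega,
      PySem.List.pyGet?_natCast]
  have hlt : n.toNat - 1 < ((List.range n.toNat).map aSeq).length := by
    simp only [List.length_map, List.length_range]; omega
  rw [List.getElem?_eq_getElem hlt]
  simp only [Option.getD_some, List.getElem_map, List.getElem_range]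

theorem f_alt_char (n : Int) (hn : 1 ≤ n) : f_alt n = aSeq (n.toNat - 1) := by
  by_cases h4 : n ≤ 4
  · interval_cases n <;> decide
  · rw [not_le] at h4
    unfold f_alt
    rw [if_neg (by omega),
        show n - 5 = ((n.toNat - 5 : Nat) : Int) by omega,
        show (48 : Int) = ((48 : Nat) : Int) from rfl,
        PySem.Int.floordiv_natCast, PySem.Int.mod_natCast,
        PySem.List.pyGet?_natCast]
    unfold aSeq
    rw [if_neg (by omega)]
    have hk : n.toNat - 1 - 4 = n.toNat - 5 := by omega
    rw [hk]

-- ===== VERDICT (by name: the statement is the Claim_ definition above) =====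
theorem f_spec : Claim_equal_f := by
  intro n _ hpre
  unfold Spec_f
  rw [f_char n hpre, f_alt_char n hpre]
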